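-- pv_equiv track=rewrite | github.com/dunnoconnor/advent_of_code_2022 | day08/p8b.py | count_invisible
-- ===== SOURCE A (Python) =====
-- def count_invisible(r:list[int],c:list[int]) -> int:
--     count = 0
--     for i in range(1,len(r)-1):
--         for j in range(1,len(c)-1):
--             this_t = r[i][j]
--             left = max(r[i][0:j])
--             right = max(r[i][j+1:len(r)])
--             up = max(c[j][0:i])
--             down = max(c[j][i+1:len(c)])
--             if this_t <= min([up,down,left,right]):
--                 count += 1
--     return count
-- ===== SOURCE B (Python) =====
-- def count_invisible(r: list[int], c: list[int]) -> int:
--     n, m = len(r), len(c)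
--     if n <= 2 or m <= 2:
--         return 0
--
--     def runmax(xs):
--         # res[k] = max(xs[0..k])
--         res = []
--         hi = xs[0]
--         for x in xs:
--             hi = hi if hi >= x else x
--             res.append(hi)
--         return res
--
--     ups = [runmax(col) for col in c]
--     downs = [runmax(col[::-1])[::-1] for col in c]
--     count = 0
--     for i in range(1, n - 1):
--         row = r[i]
--         pre = runmax(row)
--         suf = runmax(row[::-1])[::-1]
--         for j in range(1, m - 1):
--             t = row[j]
--             if t <= pre[j - 1] and t <= suf[j + 1] and t <= ups[j][i - 1] and t <= downs[j][i + 1]: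
--                 count += 1
--     return count
-- ===== Notes on version B (the rewrite author's own statement) =====
-- stated objective: faster
-- what changed: Replaces the per-cell max() over four slices (an O(n) scan inside the double loop) with running-maximum (prefix/suffix max) arrays computed once per row and per column, then a single pass over the interior cells.
import Mathlib
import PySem

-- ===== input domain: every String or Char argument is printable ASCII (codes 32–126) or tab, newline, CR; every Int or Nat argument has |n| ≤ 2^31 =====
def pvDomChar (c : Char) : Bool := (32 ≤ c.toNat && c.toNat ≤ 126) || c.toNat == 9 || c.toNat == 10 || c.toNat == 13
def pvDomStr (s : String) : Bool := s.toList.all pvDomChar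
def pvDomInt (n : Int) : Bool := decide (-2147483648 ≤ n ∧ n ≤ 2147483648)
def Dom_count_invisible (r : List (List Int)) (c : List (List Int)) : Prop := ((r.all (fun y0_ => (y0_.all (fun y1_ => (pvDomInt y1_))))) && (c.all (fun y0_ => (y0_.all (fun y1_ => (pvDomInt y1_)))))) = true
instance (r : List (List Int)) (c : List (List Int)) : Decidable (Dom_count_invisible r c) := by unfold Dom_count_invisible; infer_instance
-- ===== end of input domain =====

-- B replaces A's per-cell max() over four slices with prefix/suffix running-maximum arrays
-- computed once per row and per column (objective: faster, O(n^2) instead of O(n^3)).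

-- ===== PORT A =====
def count_invisible (r : List (List Int)) (c : List (List Int)) : Int :=
  (PySem.List.pyRange 1 ((r.length : Int) - 1) 1).foldl (fun count i =>
    (PySem.List.pyRange 1 ((c.length : Int) - 1) 1).foldl (fun count j =>
      let row := PySem.List.pyGetD r i []
      let this_t := PySem.List.pyGetD row j 0
      let left := (PySem.List.max? (PySem.List.slice row (some 0) (some j)) (fun y => y)).getD 0
      let right := (PySem.List.max? (PySem.List.slice row (some (j + 1)) (some ((r.length : Int)))) (fun y => y)).getD 0
      let col := PySem.List.pyGetD c j []
      let up := (PySem.List.max? (PySem.List.slice col (some 0) (some i)) (fun y => y)).getD 0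
      let down := (PySem.List.max? (PySem.List.slice col (some (i + 1)) (some ((c.length : Int)))) (fun y => y)).getD 0
      if this_t ≤ (PySem.List.min? [up, down, left, right] (fun y => y)).getD 0 then count + 1 else count)
      count) 0

-- ===== PORT B =====
-- helper runmax of Source B: res[k] = max(xs[0..k]), a fold carrying (res, hi)
def runmax_alt (xs : List Int) : List Int :=
  (xs.foldl (fun (st : List Int × Int) x =>
      let hi := if st.2 ≥ x then st.2 else x
      (st.1 ++ [hi], hi))
    ([], PySem.List.pyGetD xs 0 0)).1

def count_invisible_alt (r : List (List Int)) (c : List (List Int)) : Int :=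
  let n : Int := (r.length : Int)
  let m : Int := (c.length : Int)
  if n ≤ 2 ∨ m ≤ 2 then 0 else
  let ups := c.map runmax_alt
  let downs := c.map (fun col => (runmax_alt col.reverse).reverse)  -- col[::-1] is List.reverse
  (PySem.List.pyRange 1 (n - 1) 1).foldl (fun count i =>
    let row := PySem.List.pyGetD r i []
    let pre := runmax_alt row
    let suf := (runmax_alt row.reverse).reverse
    (PySem.List.pyRange 1 (m - 1) 1).foldl (fun count j =>
      let t := PySem.List.pyGetD row j 0
      if t ≤ PySem.List.pyGetD pre (j - 1) 0 ∧ t ≤ PySem.List.pyGetD suf (j + 1) 0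
         ∧ t ≤ PySem.List.pyGetD (PySem.List.pyGetD ups j []) (i - 1) 0
         ∧ t ≤ PySem.List.pyGetD (PySem.List.pyGetD downs j []) (i + 1) 0
      then count + 1 else count)
      count) 0

-- ===== PRECONDITION & SPEC =====
-- Pre_ restricts to the natural domain: well-formed square grids (plus degenerate grids with no
-- interior, where both loops are empty); A indexes and slices both arguments by len(r)/len(c)
-- interchangeably, so on non-square or ragged grids with interior cells it raises ValueError
-- (max of an empty slice) or, when rows are longer than len(r), silently ignores the trees
-- beyond column len(r)-1.
def Pre_count_invisible (r : List (List Int)) (c : List (List Int)) : Prop :=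
  (r.length ≤ 2 ∨ c.length ≤ 2) ∨
  (r.length = c.length ∧ (∀ row ∈ r, row.length = r.length) ∧ (∀ col ∈ c, col.length = r.length))
instance (r : List (List Int)) (c : List (List Int)) : Decidable (Pre_count_invisible r c) := by
  unfold Pre_count_invisible; infer_instance

def pvWitness_count_invisible : List (List Int) × List (List Int) :=
  ([[3, 1, 2], [1, 0, 1], [2, 1, 3]], [[3, 1, 2], [1, 0, 1], [2, 1, 3]])

def Spec_count_invisible (r : List (List Int)) (c : List (List Int)) (out : Int) : Prop := out = count_invisible_alt r c
instance (r : List (List Int)) (c : List (List Int)) (out : Int) : Decidable (Spec_count_invisible r c out) := by unfold Spec_count_invisible; infer_instance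

-- ===== CLAIM (what is proved, stated in full; the proofs are below) =====
def Claim_equal_count_invisible : Prop := ∀ (r : List (List Int)) (c : List (List Int)), Dom_count_invisible r c → Pre_count_invisible r c → Spec_count_invisible r c (count_invisible r c)

-- ===== LEMMAS AND PROOFS =====

-- mathematical maximum of a nonempty list ([] ↦ 0, never reached)
def M : List Int → Int
  | [] => 0
  | x :: t => t.foldl max x

-- structural version of Source B's runmax
def scanmax : Int → List Int → List Int
  | _, [] => []
  | hi, x :: t => (max hi x) :: scanmax (max hi x) t

theorem if_ge_eq_max (a b : Int) : (if a ≥ b then a else b) = max a b := by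
  split_ifs with h
  · exact (max_eq_left h).symm
  · exact (max_eq_right (le_of_not_ge h)).symm

theorem runmax_foldl (xs acc : List Int) (hi : Int) :
    (xs.foldl (fun (st : List Int × Int) x => (st.1 ++ [max st.2 x], max st.2 x)) (acc, hi)).1
      = acc ++ scanmax hi xs := by
  induction xs generalizing acc hi with
  | nil => simp [scanmax]
  | cons x t ih =>
    rw [List.foldl_cons]
    simp only [scanmax]
    rw [ih]
    simp

theorem runmax_alt_eq (xs : List Int) :
    runmax_alt xs = scanmax (PySem.List.pyGetD xs 0 0) xs := by
  unfold runmax_alt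
  simp only [if_ge_eq_max]
  simpa using runmax_foldl xs [] (PySem.List.pyGetD xs 0 0)

theorem length_scanmax (hi : Int) (xs : List Int) : (scanmax hi xs).length = xs.length := by
  induction xs generalizing hi with
  | nil => rfl
  | cons x t ih => simp [scanmax, ih]

theorem scanmax_getD (xs : List Int) (hi : Int) (k : Nat) (hk : k < xs.length) :
    (scanmax hi xs).getD k 0 = (xs.take (k + 1)).foldl max hi := by
  induction xs generalizing hi k with
  | nil => simp at hk
  | cons x t ih =>
    cases k with
    | zero => simp [scanmax]
    | succ k => simpa [scanmax] using ih (max hi x) k (by simpa using hk)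

theorem foldl_max_eq_max_M (t : List Int) (ht : t ≠ []) (a : Int) :
    t.foldl max a = max a (M t) := by
  induction t generalizing a with
  | nil => simp at ht
  | cons y u ih =>
    cases u with
    | nil => simp [M]
    | cons z w =>
      calc (y :: z :: w).foldl max a = (z :: w).foldl max (max a y) := rfl
        _ = max (max a y) (M (z :: w)) := ih (by simp) (max a y)
        _ = max a (max y (M (z :: w))) := max_assoc a y (M (z :: w))
        _ = max a ((z :: w).foldl max y) := by rw [ih (by simp) y]
        _ = max a (M (y :: z :: w)) := rfl

theorem M_append_singleton (l : List Int) (hl : l ≠ []) (x : Int) :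
    M (l ++ [x]) = max (M l) x := by
  cases l with
  | nil => simp at hl
  | cons y t =>
    simp only [List.cons_append, M, List.foldl_append, List.foldl_cons, List.foldl_nil]

theorem M_reverse (l : List Int) : M l.reverse = M l := by
  induction l with
  | nil => rfl
  | cons x t ih =>
    cases t with
    | nil => rfl
    | cons z w =>
      have hne : (z :: w).reverse ≠ [] := by simp
      rw [List.reverse_cons, M_append_singleton _ hne, ih, max_comm]
      exact (foldl_max_eq_max_M (z :: w) (by simp) x).symm

theorem max?_id_eq_M (l : List Int) (hl : l ≠ []) :
    (PySem.List.max? l (fun y => y)).getD 0 = M l := by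
  cases l with
  | nil => simp at hl
  | cons x t => rw [PySem.List.max?_id_cons]; rfl

-- B's prefix lookup: pre[j-1] = M (row.take j), for 1 ≤ j ≤ |row|
theorem pre_lookup (row : List Int) (j : Nat) (h1 : 1 ≤ j) (h2 : j ≤ row.length) :
    PySem.List.pyGetD (runmax_alt row) ((j : Int) - 1) 0 = M (row.take j) := by
  cases row with
  | nil => simp at h2; omega
  | cons x t =>
    have hcast : ((j : Int) - 1) = ((j - 1 : Nat) : Int) := by omega
    have hget0 : PySem.List.pyGetD (x :: t) 0 0 = x := by
      simpa using PySem.List.pyGetD_zero_cons (x := x) (xs := t) (d := (0 : Int))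
    rw [runmax_alt_eq, hcast, PySem.List.pyGetD_natCast, hget0]
    rw [scanmax_getD (x :: t) x (j - 1) (by simp only [List.length_cons] at h2 ⊢; omega)]
    rw [show j - 1 + 1 = j from by omega]
    have htake : (x :: t).take j = x :: t.take (j - 1) := by
      obtain ⟨j', rfl⟩ : ∃ j', j = j' + 1 := ⟨j - 1, by omega⟩
      simp [List.take_succ_cons]
    rw [htake, List.foldl_cons, max_self]
    rfl

theorem getD_reverse (l : List Int) (k : Nat) (hk : k < l.length) :
    l.reverse.getD k 0 = l.getD (l.length - 1 - k) 0 := by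
  rw [List.getD_eq_getElem?_getD, List.getD_eq_getElem?_getD]
  rw [List.getElem?_reverse (by simpa using hk)]

-- B's suffix lookup: suf[j+1] = M (row.drop (j+1)), for j+1 < |row|
theorem suf_lookup (row : List Int) (j : Nat) (h2 : j + 1 < row.length) :
    PySem.List.pyGetD ((runmax_alt row.reverse).reverse) ((j : Int) + 1) 0 = M (row.drop (j + 1)) := by
  obtain ⟨z, w, hzw⟩ : ∃ z w, row.reverse = z :: w := by
    cases hrev : row.reverse with
    | nil => rw [List.reverse_eq_nil_iff] at hrev; subst hrev; simp at h2
    | cons z w => exact ⟨z, w, rfl⟩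
  have hcast : ((j : Int) + 1) = ((j + 1 : Nat) : Int) := by push_cast; ring
  rw [hcast, PySem.List.pyGetD_natCast]
  have hlenr : (runmax_alt row.reverse).length = row.length := by
    rw [runmax_alt_eq, length_scanmax, List.length_reverse]
  rw [getD_reverse _ _ (by rw [hlenr]; omega), hlenr]
  set k := row.length - 1 - (j + 1) with hk
  rw [runmax_alt_eq]
  rw [scanmax_getD row.reverse (PySem.List.pyGetD row.reverse 0 0) k (by simp; omega)]
  have hget0 : PySem.List.pyGetD row.reverse 0 0 = z := by
    rw [hzw]; simpa using PySem.List.pyGetD_zero_cons (x := z) (xs := w) (d := (0 : Int))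
  rw [hget0]
  have htake : row.reverse.take (k + 1) = (row.drop (j + 1)).reverse := by
    rw [show k + 1 = row.length - (j + 1) from by omega, ← List.reverse_drop]
  rw [htake]
  have hdne : row.drop (j + 1) ≠ [] := by
    intro h
    have hlen := congrArg List.length h
    simp at hlen
    omega
  obtain ⟨y, u, hyu⟩ : ∃ y u, (row.drop (j + 1)).reverse = y :: u := by
    cases hh : (row.drop (j + 1)).reverse with
    | nil => rw [List.reverse_eq_nil_iff] at hh; exact absurd hh hdne
    | cons y u => exact ⟨y, u, rfl⟩
  have hz : z = y := by
    have ha : row.reverse.head? = some z := by rw [hzw]; rfl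
    have hb : (row.drop (j + 1)).reverse.head? = some y := by rw [hyu]; rfl
    rw [List.head?_reverse] at ha hb
    rw [List.getLast?_drop] at hb
    rw [if_neg (by omega), ha] at hb
    exact Option.some_inj.mp hb
  rw [hyu, List.foldl_cons, hz, max_self]
  have hM : M ((row.drop (j + 1)).reverse) = u.foldl max y := by rw [hyu]; rfl
  rw [← hM, M_reverse]

-- A's left/up slice value
theorem left_A (row : List Int) (j : Nat) (h1 : 1 ≤ j) (h2 : j ≤ row.length) :
    (PySem.List.max? (PySem.List.slice row (some 0) (some (j : Int))) (fun y => y)).getD 0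
      = M (row.take j) := by
  have h0 : ((0 : Int)) = ((0 : Nat) : Int) := rfl
  rw [h0, PySem.List.slice_natCast]
  simp only [List.drop_zero, Nat.sub_zero]
  apply max?_id_eq_M
  intro h
  rcases List.take_eq_nil_iff.mp h with h' | h'
  · omega
  · subst h'; simp at h2; omega

-- A's right/down slice value (slice end L with row.length ≤ L clamps to the whole suffix)
theorem right_A (row : List Int) (j : Nat) (L : Nat) (hL : row.length ≤ L) (h2 : j + 1 < row.length) :
    (PySem.List.max? (PySem.List.slice row (some ((j : Int) + 1)) (some (L : Int))) (fun y => y)).getD 0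
      = M (row.drop (j + 1)) := by
  have hcast : ((j : Int) + 1) = ((j + 1 : Nat) : Int) := by push_cast; ring
  rw [hcast, PySem.List.slice_natCast]
  have htake : (row.drop (j + 1)).take (L - (j + 1)) = row.drop (j + 1) := by
    apply List.take_of_length_le
    rw [List.length_drop]
    omega
  rw [htake]
  apply max?_id_eq_M
  intro h
  have hlen := congrArg List.length h
  simp at hlen
  omega

theorem min4 (a b cc d t : Int) :
    (t ≤ (PySem.List.min? [a, b, cc, d] (fun y => y)).getD 0)
      ↔ (t ≤ a ∧ t ≤ b ∧ t ≤ cc ∧ t ≤ d) := by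
  rw [PySem.List.min?_id_cons]
  simp only [List.foldl_cons, List.foldl_nil, Option.getD_some]
  omega

theorem pyGetD_natcast_list (l : List (List Int)) (k : Nat) (hk : k < l.length) :
    PySem.List.pyGetD l (k : Int) [] = l[k] := by
  rw [PySem.List.pyGetD_natCast]
  exact List.getD_eq_getElem l [] hk

theorem foldl_id_int (l : List Int) (a : Int) : l.foldl (fun acc _ => acc) a = a := by
  induction l generalizing a with
  | nil => rfl
  | cons x t ih => exact ih a

-- ===== VERDICT (by name: the statement is the Claim_ definition above) =====
theorem count_invisible_spec : Claim_equal_count_invisible := by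
  intro r c _ hpre
  unfold Spec_count_invisible count_invisible count_invisible_alt
  by_cases hdeg : (r.length : Int) ≤ 2 ∨ (c.length : Int) ≤ 2
  · -- degenerate: no interior cells, both sides are 0
    rw [if_pos hdeg]
    rcases hdeg with h | h
    · rw [PySem.List.pyRange_one_eq_nil (a := (1:Int)) (b := (r.length : Int) - 1) (by omega)]
      rfl
    · rw [PySem.List.pyRange_one_eq_nil (a := (1:Int)) (b := (c.length : Int) - 1) (by omega)]
      simp only [List.foldl_nil]
      exact foldl_id_int _ 0
  · -- square grid with interior
    rw [if_neg hdeg]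
    push_neg at hdeg
    have hsq : r.length = c.length ∧ (∀ row ∈ r, row.length = r.length) ∧
        (∀ col ∈ c, col.length = r.length) := by
      rcases hpre with (h | h) | h
      · omega
      · omega
      · exact h
    obtain ⟨hnm, hr, hc⟩ := hsq
    set n := r.length with hn
    have hm : c.length = n := hnm.symm
    have hn3 : 3 ≤ n := by omega
    apply PySem.List.foldl_congr_mem
    intro count i hi
    rw [PySem.List.mem_pyRange_one] at hi
    apply PySem.List.foldl_congr_mem
    intro cnt j hj
    rw [PySem.List.mem_pyRange_one] at hj
    -- name the nat indices
    obtain ⟨iN, rfl⟩ : ∃ k : Nat, i = (k : Int) := ⟨i.toNat, by omega⟩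
    obtain ⟨jN, rfl⟩ : ∃ k : Nat, j = (k : Int) := ⟨j.toNat, by omega⟩
    have hiN : 1 ≤ iN ∧ iN + 1 < n := by omega
    have hjN : 1 ≤ jN ∧ jN + 1 < n := by omega
    have hiR : iN < r.length := by omega
    have hjC : jN < c.length := by omega
    have hrow : PySem.List.pyGetD r (iN : Int) [] = r[iN] := pyGetD_natcast_list r iN hiR
    have hcol : PySem.List.pyGetD c (jN : Int) [] = (c)[jN] := pyGetD_natcast_list c jN hjC
    have hrowlen : (r[iN]).length = n := hr _ (List.getElem_mem hiR)
    have hcollen : ((c)[jN]).length = n := hc _ (List.getElem_mem hjC)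
    rw [hrow, hcol]
    dsimp only
    -- the four directional values
    rw [left_A (r[iN]) jN hjN.1 (by omega)]
    rw [right_A (r[iN]) jN r.length (by omega) (by omega)]
    rw [left_A ((c)[jN]) iN hiN.1 (by omega)]
    rw [right_A ((c)[jN]) iN c.length (by omega) (by omega)]
    rw [pre_lookup (r[iN]) jN hjN.1 (by omega)]
    rw [suf_lookup (r[iN]) jN (by omega)]
    have hups : PySem.List.pyGetD (c.map runmax_alt) (jN : Int) [] = runmax_alt (c)[jN] := by
      rw [PySem.List.pyGetD_natCast, List.getD_eq_getElem _ _ (by simpa using hjC)]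
      simp
    have hdowns : PySem.List.pyGetD (c.map (fun col => (runmax_alt col.reverse).reverse)) (jN : Int) []
        = (runmax_alt ((c)[jN]).reverse).reverse := by
      rw [PySem.List.pyGetD_natCast, List.getD_eq_getElem _ _ (by simpa using hjC)]
      simp
    rw [hups, hdowns]
    rw [pre_lookup ((c)[jN]) iN hiN.1 (by omega)]
    rw [suf_lookup ((c)[jN]) iN (by omega)]
    apply if_congr _ rfl rfl
    rw [min4]
    constructor
    · rintro ⟨h1, h2, h3, h4⟩; exact ⟨h3, h4, h1, h2⟩
    · rintro ⟨h1, h2, h3, h4⟩; exact ⟨h3, h4, h1, h2⟩
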